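-- pv_equiv track=rewrite | github.com/averykhoo/temporal-patterns | utils.py | sort_fqdns
-- ===== SOURCE A (Python) =====
-- from typing import Iterable
--
-- def sort_fqdns(fqdns: Iterable[str], unique=True, lowercase=True):
--     subdomain_map = dict()
--     for fqdn in sorted(fqdns, key=len):
--         if lowercase:
--             fqdn = fqdn.lower()
--         for domain in subdomain_map:
--             if fqdn.endswith(domain):
--                 subdomain_map[domain].append(fqdn)
--                 break
--         else:
--             subdomain_map[fqdn] = []
--
--     out = []
--     for domain in sorted(subdomain_map):
--         out.append(domain)
--         if unique:
--             out.extend(sorted(set(subdomain_map[domain])))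
--         else:
--             out.extend(sorted(subdomain_map[domain]))
--
--     return out
-- ===== SOURCE B (Python) =====
-- def sort_fqdns(fqdns, unique=True, lowercase=True):
--     strings = [f.lower() for f in fqdns] if lowercase else list(fqdns)
--     present = set(strings)
--
--     def root(f):
--         # shortest suffix of f (from '' up to f itself) that occurs in the input
--         for j in range(len(f) + 1):
--             s = f[len(f) - j:]
--             if s in present:
--                 return s
--         return f  # unreachable: f itself is always present
--
--     groups = {}
--     claimed = set()
--     for f in strings:
--         k = root(f)
--         if k == f and f not in claimed:
--             claimed.add(f)
--             groups.setdefault(f, [])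
--         else:
--             groups.setdefault(k, []).append(f)
--
--     out = []
--     for k in sorted(groups):
--         out.append(k)
--         members = groups[k]
--         out.extend(sorted(set(members)) if unique else sorted(members))
--     return out
-- ===== Notes on version B (the rewrite author's own statement) =====
-- stated objective: alternative
-- what changed: A sorts by length and scans the growing dict of key-domains with endswith for every fqdn; B drops the sort entirely, builds the set of all (lowercased) inputs once, computes each string's shortest suffix present in that set by hashed suffix lookups, and groups in a single pass over the original order.
import Mathlib
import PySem

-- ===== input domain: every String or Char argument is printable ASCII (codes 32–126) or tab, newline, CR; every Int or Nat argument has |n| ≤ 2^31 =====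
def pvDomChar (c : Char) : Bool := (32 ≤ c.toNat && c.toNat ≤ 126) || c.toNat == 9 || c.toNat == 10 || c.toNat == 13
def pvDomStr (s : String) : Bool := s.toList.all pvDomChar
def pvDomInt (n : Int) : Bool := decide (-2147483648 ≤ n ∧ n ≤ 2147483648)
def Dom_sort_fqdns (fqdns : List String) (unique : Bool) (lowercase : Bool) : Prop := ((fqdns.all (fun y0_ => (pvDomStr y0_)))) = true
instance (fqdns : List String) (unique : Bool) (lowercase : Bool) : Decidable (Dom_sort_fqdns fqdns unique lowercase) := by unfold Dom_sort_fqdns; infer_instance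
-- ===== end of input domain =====

-- B replaces A's length-sort plus linear scan of the growing key dict by a one-shot set of
-- all inputs and a shortest-present-suffix lookup per string; a different algorithm, same output.

-- ===== PORT A =====
def sort_fqdns (fqdns : List String) (unique : Bool) (lowercase : Bool) : List String :=
  -- for fqdn in sorted(fqdns, key=len): … building subdomain_map
  let subdomain_map : PySem.Dict String (List String) :=
    (PySem.List.sorted fqdns (fun s => s.length)).foldl
      (fun d fqdn0 =>
        let fqdn := if lowercase then PySem.Str.lower fqdn0 else fqdn0
        match d.keys.find? (fun domain => PySem.Str.endswith fqdn domain) with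
        | some domain => d.modify domain [] (fun l => l ++ [fqdn])  -- subdomain_map[domain].append(fqdn); break
        | none => d.insert fqdn [])                                 -- for/else: no key matched
      PySem.Dict.empty
  -- output loop over sorted keys
  (PySem.List.sorted subdomain_map.keys (fun s => s)).foldl
    (fun out domain =>
      let out := out ++ [domain]
      if unique then out ++ PySem.List.sorted (PySem.Set.ofList (subdomain_map.getD domain [])) (fun s => s)
      else out ++ PySem.List.sorted (subdomain_map.getD domain []) (fun s => s))
    []

-- ===== PORT B =====
-- Source B's root(f): scan the suffixes of f shortest-first (f[len(f)-j:] with a nonnegative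
-- index is List.drop (len f - j)) and return the first one present in `present`.
def pvRootOf (present : List String) (f : String) : String :=
  (((List.range (f.length + 1)).map
      (fun j => String.ofList (f.toList.drop (f.length - j)))).find?
    (fun s => present.contains s)).getD f

def sort_fqdns_alt (fqdns : List String) (unique : Bool) (lowercase : Bool) : List String :=
  let strings := if lowercase then fqdns.map PySem.Str.lower else fqdns
  let present : PySem.Set String := PySem.Set.ofList strings
  let st := strings.foldl
    (fun (st : PySem.Dict String (List String) × PySem.Set String) f =>
      let k := pvRootOf present f
      if k = f ∧ ¬ f ∈ st.2 then (st.1.setdefault f [], st.2.add f)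
      else (st.1.modify k [] (fun l => l ++ [f]), st.2))  -- groups.setdefault(k, []).append(f)
    (PySem.Dict.empty, PySem.Set.empty)
  let groups := st.1
  (PySem.List.sorted groups.keys (fun s => s)).foldl
    (fun out k =>
      let out := out ++ [k]
      if unique then out ++ PySem.List.sorted (PySem.Set.ofList (groups.getD k [])) (fun s => s)
      else out ++ PySem.List.sorted (groups.getD k []) (fun s => s))
    []

-- ===== PRECONDITION & SPEC =====
def Spec_sort_fqdns (fqdns : List String) (unique : Bool) (lowercase : Bool) (out : List String) : Prop := out = sort_fqdns_alt fqdns unique lowercase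
instance (fqdns : List String) (unique : Bool) (lowercase : Bool) (out : List String) : Decidable (Spec_sort_fqdns fqdns unique lowercase out) := by unfold Spec_sort_fqdns; infer_instance

-- ===== CLAIM (what is proved, stated in full; the proofs are below) =====
def Claim_equal_sort_fqdns : Prop := ∀ (fqdns : List String) (unique : Bool) (lowercase : Bool), Dom_sort_fqdns fqdns unique lowercase → Spec_sort_fqdns fqdns unique lowercase (sort_fqdns fqdns unique lowercase)

-- ===== LEMMAS AND PROOFS =====

-- x is a member of S none of whose proper suffixes is in S
def SuffMin (S : List String) (x : String) : Prop :=
  x ∈ S ∧ ∀ s ∈ S, s.toList <:+ x.toList → s = x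

theorem suffix_eq_drop {l₁ l₂ : List Char} (h : l₁ <:+ l₂) :
    l₁ = l₂.drop (l₂.length - l₁.length) := by
  obtain ⟨t, rfl⟩ := h
  simp

theorem find?_eq_some_of_unique {α : Type} {l : List α} {p : α → Bool} {a : α}
    (ha : a ∈ l) (hpa : p a = true) (huniq : ∀ b ∈ l, p b = true → b = a) :
    l.find? p = some a := by
  induction l with
  | nil => cases ha
  | cons x xs ih =>
    rcases List.mem_cons.mp ha with rfl | ha
    · simp [List.find?, hpa]
    · by_cases hx : p x = true
      · have hxa := huniq x (by simp) hx
        subst hxa; simp [List.find?, hpa]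
      · simp only [List.find?]
        rw [Bool.eq_false_iff.mpr hx]
        exact ih ha (fun b hb => huniq b (List.mem_cons_of_mem _ hb))

-- characterisation of pvRootOf: the shortest suffix of f present in S
theorem pvRootOf_spec (S : List String) (f : String) (hf : f ∈ S) :
    pvRootOf S f ∈ S ∧ (pvRootOf S f).toList <:+ f.toList ∧
      ∀ s ∈ S, s.toList <:+ (pvRootOf S f).toList → s = pvRootOf S f := by
  classical
  have hcslen : f.toList.length = f.length := String.length_toList
  set n := f.length with hn
  set cs := f.toList with hcs
  set g : Nat → String := fun j => String.ofList (cs.drop (n - j)) with hg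
  set M := (List.range (n+1)).map g with hM
  have hMlen : M.length = n + 1 := by simp [hM]
  have hMget : ∀ (j : Nat) (h : j < n + 1), M[j]'(by omega) = g j := by
    intro j h; simp [hM]
  have hgn : g n = f := by
    simp only [hg, Nat.sub_self, List.drop_zero]
    rw [hcs, String.ofList_toList]
  have hfM : f ∈ M := by
    rw [hM, List.mem_map]
    exact ⟨n, by simp, hgn⟩
  have hsome : (M.find? (fun s => S.contains s)).isSome := by
    rw [List.find?_isSome]
    exact ⟨f, hfM, by simpa using hf⟩
  obtain ⟨r, hr⟩ : ∃ r, M.find? (fun s => S.contains s) = some r := by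
    cases h : M.find? (fun s => S.contains s) with
    | none => rw [h] at hsome; simp at hsome
    | some r => exact ⟨r, rfl⟩
  have hroot : pvRootOf S f = r := by
    simp only [pvRootOf, ← hn, ← hcs, ← hg, ← hM, hr, Option.getD_some]
  rw [List.find?_eq_some_iff_append] at hr
  obtain ⟨hpr, as, bs, hsplit, hfalse⟩ := hr
  have hj0 : as.length < n + 1 := by
    have := congrArg List.length hsplit
    simp [hMlen] at this; omega
  set j0 := as.length with hj0def
  have hlen2 : j0 < (as ++ r :: bs).length := by
    rw [← hsplit]; omega
  have hrg : r = g j0 := by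
    have h1 : M[j0]'(by omega) = g j0 := hMget j0 hj0
    have h2 : M[j0]'(by omega) = (as ++ r :: bs)[j0]'hlen2 := List.getElem_of_eq hsplit _
    rw [List.getElem_append_right (by omega)] at h2
    have h3 : j0 - as.length = 0 := by omega
    simp only [h3, List.getElem_cons_zero] at h2
    rw [← h1, h2]
  have hrtl : r.toList = cs.drop (n - j0) := by
    rw [hrg]; simp [hg, String.toList_ofList]
  have hrlen : r.toList.length = j0 := by
    rw [hrtl]; simp; omega
  have hrS : r ∈ S := by simpa using hpr
  have hrsuff : r.toList <:+ cs := by rw [hrtl]; exact List.drop_suffix _ _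
  refine ⟨hroot ▸ hrS, hroot ▸ hrsuff, ?_⟩
  rw [hroot]
  intro s hsS hsr
  have hscs : s.toList <:+ cs := hsr.trans hrsuff
  have hslen : s.toList.length ≤ j0 := by
    have := hsr.length_le; omega
  have hseq : s.toList = cs.drop (n - s.toList.length) := by
    have := suffix_eq_drop hscs
    rw [hcslen] at this; exact this
  by_cases hlt : s.toList.length < j0
  · exfalso
    have hgs : g s.toList.length = s := by
      rw [hg]; simp only []
      rw [← hseq, String.ofList_toList]
    have hmem : s ∈ as := by
      have h1 : M[s.toList.length]'(by omega) = g s.toList.length := hMget _ (by omega)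
      have h2 : M[s.toList.length]'(by omega) =
          (as ++ r :: bs)[s.toList.length]'(by rw [← hsplit]; omega) :=
        List.getElem_of_eq hsplit _
      rw [List.getElem_append_left (by omega)] at h2
      rw [h1, hgs] at h2
      exact h2 ▸ List.getElem_mem _
    have := hfalse s hmem
    simp [hsS] at this
  · have hlen : s.toList.length = j0 := by omega
    have : s.toList = r.toList := by rw [hseq, hrtl, hlen]
    exact String.toList_inj.mp this

theorem pvRootOf_eq_self (S : List String) (f : String) (hf : f ∈ S) (h : SuffMin S f) :
    pvRootOf S f = f := by
  obtain ⟨h1, h2, _⟩ := pvRootOf_spec S f hf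
  exact h.2 _ h1 h2

theorem pvRootOf_unique (S : List String) (f x : String) (hf : f ∈ S)
    (hx : x.toList <:+ f.toList) (hmin : SuffMin S x) : pvRootOf S f = x := by
  obtain ⟨h1, h2, h3⟩ := pvRootOf_spec S f hf
  rcases List.suffix_or_suffix_of_suffix h2 hx with h | h
  · exact (hmin.2 _ h1 h).symm ▸ rfl
  · exact (h3 _ hmin.1 h).symm

theorem SuffMin_pvRootOf (S : List String) (f : String) (hf : f ∈ S) :
    SuffMin S (pvRootOf S f) := by
  obtain ⟨h1, _, h3⟩ := pvRootOf_spec S f hf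
  exact ⟨h1, h3⟩


theorem endswith_iff' (s p : String) : PySem.Str.endswith s p = true ↔ p.toList <:+ s.toList := by
  rw [PySem.Str.endswith_eq]; exact PySem.Chars.endswith_iff _ _

theorem suffix_len_eq {a b : String} (h : a.toList <:+ b.toList) (hlen : b.length ≤ a.length) :
    a = b := by
  have h1 := h.length_le
  rw [String.length_toList, String.length_toList] at h1
  have h2 : a.toList = b.toList := h.eq_of_length (by rw [String.length_toList, String.length_toList]; omega)
  exact String.toList_inj.mp h2

-- A's per-element step, with the (possibly lowercased) string already supplied
def stepA (d : PySem.Dict String (List String)) (f : String) : PySem.Dict String (List String) :=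
  match d.keys.find? (fun domain => PySem.Str.endswith f domain) with
  | some domain => d.modify domain [] (fun l => l ++ [f])
  | none => d.insert f []

-- B's per-element step
def stepB (SL : List String) (st : PySem.Dict String (List String) × PySem.Set String)
    (f : String) : PySem.Dict String (List String) × PySem.Set String :=
  let k := pvRootOf SL f
  if k = f ∧ ¬ f ∈ st.2 then (st.1.setdefault f [], st.2.add f)
  else (st.1.modify k [] (fun l => l ++ [f]), st.2)

theorem A_fold_inv (SL : List String) (rest : List String) :
    ∀ (p : List String) (d : PySem.Dict String (List String)),
    (p ++ rest).Pairwise (fun a b => a.length ≤ b.length) →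
    (∀ x, x ∈ p ++ rest ↔ x ∈ SL) →
    (∀ x, x ∈ d.keys ↔ x ∈ p ∧ SuffMin SL x) →
    d.keys.Nodup →
    (∀ k, d.getD k [] = ((p.filter (fun f => pvRootOf SL f == k)).erase k)) →
    (∀ x, x ∈ (rest.foldl stepA d).keys ↔ x ∈ p ++ rest ∧ SuffMin SL x) ∧
    (rest.foldl stepA d).keys.Nodup ∧
    (∀ k, (rest.foldl stepA d).getD k [] =
      (((p ++ rest).filter (fun f => pvRootOf SL f == k)).erase k)) := by
  induction rest with
  | nil =>
    intro p d _ _ hkeys hnd hgrp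
    simp only [List.foldl_nil, List.append_nil]
    exact ⟨hkeys, hnd, hgrp⟩
  | cons f rest ih =>
    intro p d hpair hmem hkeys hnd hgrp
    have hfSL : f ∈ SL := (hmem f).mp (by simp)
    obtain ⟨hrS, hrsuff, hrmin⟩ := pvRootOf_spec SL f hfSL
    set r := pvRootOf SL f with hr
    have hrminS : SuffMin SL r := ⟨hrS, hrmin⟩
    have hpairs := List.pairwise_append.mp hpair
    have hpf : ∀ g ∈ p, g.length ≤ f.length := fun g hg => hpairs.2.2 g hg f (by simp)
    have hfr : ∀ b ∈ rest, f.length ≤ b.length := (List.pairwise_cons.mp hpairs.2.1).1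
    have huniq : ∀ b ∈ d.keys, PySem.Str.endswith f b = true → b = r := by
      intro b hb hbe
      have hbsuff : b.toList <:+ f.toList := (endswith_iff' f b).mp hbe
      have hbmin : SuffMin SL b := ((hkeys b).mp hb).2
      exact (pvRootOf_unique SL f b hfSL hbsuff hbmin).symm
    have hassoc : (p ++ [f]) ++ rest = p ++ f :: rest := by simp
    have hpair' : ((p ++ [f]) ++ rest).Pairwise (fun a b => a.length ≤ b.length) := by
      rw [hassoc]; exact hpair
    have hmem' : ∀ x, x ∈ (p ++ [f]) ++ rest ↔ x ∈ SL := by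
      intro x; rw [hassoc]; exact hmem x
    -- no element of p has root f unless f itself is in p
    have hrootp : ∀ g ∈ p, pvRootOf SL g = f → f = g := by
      intro g hg hgr
      have hgSL : g ∈ SL := (hmem g).mp (List.mem_append_left _ hg)
      obtain ⟨_, hsuff, _⟩ := pvRootOf_spec SL g hgSL
      rw [hgr] at hsuff
      exact suffix_len_eq hsuff (hpf g hg)
    by_cases hcase : r = f ∧ f ∉ p
    · -- f becomes a new key
      obtain ⟨hrf, hfp⟩ := hcase
      have hminf : SuffMin SL f := hrf ▸ hrminS
      have hnotkey : f ∉ d.keys := fun h => hfp ((hkeys f).mp h).1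
      have hnone : d.keys.find? (fun domain => PySem.Str.endswith f domain) = none := by
        rw [List.find?_eq_none]
        intro b hb hbe
        exact hnotkey ((huniq b hb hbe).trans hrf ▸ hb)
      have hstep : stepA d f = d.insert f [] := by
        simp only [stepA, hnone]
      have hkeys' : ∀ x, x ∈ (d.insert f ([] : List String)).keys ↔ x ∈ p ++ [f] ∧ SuffMin SL x := by
        intro x
        rw [PySem.Dict.mem_keys_insert]
        constructor
        · rintro (rfl | hx)
          · exact ⟨by simp, hminf⟩
          · obtain ⟨h1, h2⟩ := (hkeys x).mp hx
            exact ⟨List.mem_append_left _ h1, h2⟩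
        · rintro ⟨hx, hmin⟩
          rcases List.mem_append.mp hx with hx | hx
          · exact Or.inr ((hkeys x).mpr ⟨hx, hmin⟩)
          · simp at hx; exact Or.inl hx
      have hnd' : (d.insert f ([] : List String)).keys.Nodup :=
        PySem.Dict.nodup_keys_insert d f [] hnd
      have hfilp : p.filter (fun g => pvRootOf SL g == f) = [] := by
        rw [List.filter_eq_nil_iff]
        intro g hg hgp
        rw [beq_iff_eq] at hgp
        exact hfp ((hrootp g hg hgp) ▸ hg)
      have hgrp' : ∀ k, (d.insert f ([] : List String)).getD k [] =
          (((p ++ [f]).filter (fun g => pvRootOf SL g == k)).erase k) := by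
        intro k
        rw [PySem.Dict.getD_insert, List.filter_append]
        by_cases hk : k = f
        · subst hk
          rw [if_pos rfl, hfilp]
          simp [← hr, hrf]
        · rw [if_neg hk]
          have : [f].filter (fun g => pvRootOf SL g == k) = [] := by
            simp [← hr, hrf, Ne.symm hk]
          rw [this, List.append_nil, hgrp k]
      have := ih (p ++ [f]) (d.insert f []) hpair' hmem' hkeys' hnd' hgrp'
      rw [hassoc] at this
      simpa only [List.foldl_cons, hstep] using this
    · -- f joins the group of the unique matching key r
      have hrp : r ∈ p := by
        by_cases hrf : r = f
        · rcases not_and_or.mp hcase with h | h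
          · exact absurd hrf h
          · exact hrf ▸ not_not.mp h
        · have hrmem : r ∈ p ++ f :: rest := (hmem r).mpr hrS
          rcases List.mem_append.mp hrmem with h | h
          · exact h
          · exfalso
            rcases List.mem_cons.mp h with h | h
            · exact hrf h
            · have h1 : f.length ≤ r.length := hfr r h
              exact hrf (suffix_len_eq hrsuff h1)
      have hrkey : r ∈ d.keys := (hkeys r).mpr ⟨hrp, hrminS⟩
      have hfind : d.keys.find? (fun domain => PySem.Str.endswith f domain) = some r :=
        find?_eq_some_of_unique hrkey ((endswith_iff' f r).mpr hrsuff) huniq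
      have hstep : stepA d f = d.modify r [] (fun l => l ++ [f]) := by
        simp only [stepA, hfind]
      have hrootr : pvRootOf SL r = r := pvRootOf_eq_self SL r hrS hrminS
      have hkeysmod : ∀ x, x ∈ (d.modify r [] (fun l => l ++ [f])).keys ↔ x ∈ d.keys := by
        intro x
        rw [PySem.Dict.keys_modify,
          PySem.Dict.keys_insert_of_contains _ _ ((PySem.Dict.contains_iff_mem_keys d r).mpr hrkey)]
      have hkeys' : ∀ x, x ∈ (d.modify r [] (fun l => l ++ [f])).keys ↔ x ∈ p ++ [f] ∧ SuffMin SL x := by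
        intro x
        rw [hkeysmod x, hkeys x]
        constructor
        · rintro ⟨h1, h2⟩; exact ⟨List.mem_append_left _ h1, h2⟩
        · rintro ⟨hx, hmin⟩
          refine ⟨?_, hmin⟩
          rcases List.mem_append.mp hx with hx | hx
          · exact hx
          · simp at hx; subst hx
            have : r = x := pvRootOf_eq_self SL x hmin.1 hmin
            exact this ▸ hrp
      have hnd' : (d.modify r [] (fun l => l ++ [f])).keys.Nodup := by
        have : (d.modify r [] (fun l => l ++ [f])).keys = d.keys := by
          rw [PySem.Dict.keys_modify,
            PySem.Dict.keys_insert_of_contains _ _ ((PySem.Dict.contains_iff_mem_keys d r).mpr hrkey)]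
        rw [this]; exact hnd
      have hrfil : r ∈ p.filter (fun g => pvRootOf SL g == r) :=
        List.mem_filter.mpr ⟨hrp, by simp [hrootr]⟩
      have hgrp' : ∀ k, (d.modify r [] (fun l => l ++ [f])).getD k [] =
          (((p ++ [f]).filter (fun g => pvRootOf SL g == k)).erase k) := by
        intro k
        rw [PySem.Dict.getD_modify, List.filter_append]
        by_cases hk : k = r
        · subst hk
          rw [if_pos rfl, hgrp r]
          have hff : [f].filter (fun g => pvRootOf SL g == r) = [f] := by simp [← hr]
          rw [hff, List.erase_append_left _ hrfil]
        · rw [if_neg hk]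
          have hff : [f].filter (fun g => pvRootOf SL g == k) = [] := by
            simp [← hr, Ne.symm hk]
          rw [hff, List.append_nil, hgrp k]
      have := ih (p ++ [f]) (d.modify r [] (fun l => l ++ [f])) hpair' hmem' hkeys' hnd' hgrp'
      rw [hassoc] at this
      simpa only [List.foldl_cons, hstep] using this


theorem setdefault_eq {κ ν : Type} [BEq κ] (d : PySem.Dict κ ν) (k : κ) (v : ν) :
    d.setdefault k v = if d.contains k = true then d else d.insert k v := by
  unfold PySem.Dict.setdefault
  by_cases h : d.contains k = true
  · rw [if_pos h, if_pos h]
  · rw [if_neg h, if_neg h]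
    apply PySem.Dict.ext
    rw [PySem.Dict.items_insert_of_not_contains _ _ (by simpa using h)]

theorem B_fold_inv (SL : List String) (rest : List String) :
    ∀ (q : List String) (st : PySem.Dict String (List String) × PySem.Set String),
    (∀ x, x ∈ q ++ rest → x ∈ SL) →
    (∀ x, x ∈ st.1.keys ↔ ∃ f ∈ q, pvRootOf SL f = x) →
    st.1.keys.Nodup →
    (∀ k, st.1.getD k [] = ((q.filter (fun f => pvRootOf SL f == k)).erase k)) →
    (∀ x, x ∈ st.2 ↔ x ∈ q ∧ pvRootOf SL x = x) →
    (∀ x, x ∈ (rest.foldl (stepB SL) st).1.keys ↔ ∃ f ∈ q ++ rest, pvRootOf SL f = x) ∧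
    (rest.foldl (stepB SL) st).1.keys.Nodup ∧
    (∀ k, (rest.foldl (stepB SL) st).1.getD k [] =
      (((q ++ rest).filter (fun f => pvRootOf SL f == k)).erase k)) := by
  induction rest with
  | nil =>
    intro q st _ hkeys hnd hgrp _
    simp only [List.foldl_nil, List.append_nil]
    exact ⟨hkeys, hnd, hgrp⟩
  | cons f rest ih =>
    intro q st hmem hkeys hnd hgrp hcl
    have hfSL : f ∈ SL := hmem f (by simp)
    obtain ⟨hk0S, hk0suff, hk0min⟩ := pvRootOf_spec SL f hfSL
    set k0 := pvRootOf SL f with hk0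
    have hk0root : pvRootOf SL k0 = k0 := pvRootOf_eq_self SL k0 hk0S ⟨hk0S, hk0min⟩
    have hassoc : (q ++ [f]) ++ rest = q ++ f :: rest := by simp
    have hmem' : ∀ x, x ∈ (q ++ [f]) ++ rest → x ∈ SL := by
      intro x hx; exact hmem x (hassoc ▸ hx)
    simp only [List.foldl_cons]
    by_cases hcond : k0 = f ∧ ¬ f ∈ st.2
    · -- first occurrence of a minimal string: it becomes a key, joins `claimed`
      have hstep : stepB SL st f = (st.1.setdefault f [], st.2.add f) := by
        simp only [stepB, ← hk0]; rw [if_pos hcond]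
      obtain ⟨hk0f, hfcl⟩ := hcond
      have hrootf : pvRootOf SL f = f := by rw [← hk0, hk0f]
      have hfq : f ∉ q := fun h => hfcl ((hcl f).mpr ⟨h, hrootf⟩)
      have hcl' : ∀ x, x ∈ st.2.add f ↔ x ∈ q ++ [f] ∧ pvRootOf SL x = x := by
        intro x
        rw [PySem.Set.mem_add]
        constructor
        · rintro (hx | rfl)
          · obtain ⟨h1, h2⟩ := (hcl x).mp hx
            exact ⟨List.mem_append_left _ h1, h2⟩
          · exact ⟨by simp, hrootf⟩
        · rintro ⟨hx, hr⟩
          rcases List.mem_append.mp hx with h | h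
          · exact Or.inl ((hcl x).mpr ⟨h, hr⟩)
          · simp at h; exact Or.inr h
      have hkeys0 : ∀ x, x ∈ (st.1.setdefault f ([] : List String)).keys ↔
          (x = f ∨ x ∈ st.1.keys) := by
        intro x
        rw [setdefault_eq]
        by_cases hc : st.1.contains f = true
        · rw [if_pos hc]
          constructor
          · exact Or.inr
          · rintro (rfl | h)
            · exact (PySem.Dict.contains_iff_mem_keys _ _).mp hc
            · exact h
        · rw [if_neg hc]
          exact PySem.Dict.mem_keys_insert _ _ _ _
      have hkeys' : ∀ x, x ∈ (st.1.setdefault f ([] : List String)).keys ↔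
          ∃ g ∈ q ++ [f], pvRootOf SL g = x := by
        intro x
        rw [hkeys0 x]
        constructor
        · rintro (hxf | h)
          · exact ⟨f, by simp, by rw [hrootf, hxf]⟩
          · obtain ⟨g, hg, hgr⟩ := (hkeys x).mp h
            exact ⟨g, List.mem_append_left _ hg, hgr⟩
        · rintro ⟨g, hg, hgr⟩
          rcases List.mem_append.mp hg with h | h
          · exact Or.inr ((hkeys x).mpr ⟨g, h, hgr⟩)
          · simp at h; subst h
            exact Or.inl (by rw [← hgr, hrootf])
      have hnd' : (st.1.setdefault f ([] : List String)).keys.Nodup := by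
        rw [setdefault_eq]
        by_cases hc : st.1.contains f = true
        · rw [if_pos hc]; exact hnd
        · rw [if_neg hc]; exact PySem.Dict.nodup_keys_insert _ _ _ hnd
      have hgrp' : ∀ k, (st.1.setdefault f ([] : List String)).getD k [] =
          (((q ++ [f]).filter (fun g => pvRootOf SL g == k)).erase k) := by
        intro k
        rw [List.filter_append, setdefault_eq]
        by_cases hc : st.1.contains f = true
        · rw [if_pos hc]
          by_cases hk : k = f
          · rw [hk, hgrp f]
            have hff : [f].filter (fun g => pvRootOf SL g == f) = [f] := by simp [hrootf]
            have hnotin : f ∉ q.filter (fun g => pvRootOf SL g == f) :=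
              fun h => hfq (List.mem_filter.mp h).1
            rw [hff, List.erase_append_right _ hnotin, List.erase_of_not_mem hnotin]
            simp
          · have hff : [f].filter (fun g => pvRootOf SL g == k) = [] := by
              simp [hrootf, Ne.symm hk]
            rw [hff, List.append_nil, hgrp k]
        · rw [if_neg hc, PySem.Dict.getD_insert]
          have hnokeyf : ¬ ∃ g ∈ q, pvRootOf SL g = f := by
            rintro ⟨g, hg, hgr⟩
            have : st.1.contains f = true :=
              (PySem.Dict.contains_iff_mem_keys _ _).mpr ((hkeys f).mpr ⟨g, hg, hgr⟩)
            exact hc this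
          by_cases hk : k = f
          · rw [if_pos hk, hk]
            have hfilq : q.filter (fun g => pvRootOf SL g == f) = [] := by
              rw [List.filter_eq_nil_iff]
              intro g hg hgp
              rw [beq_iff_eq] at hgp
              exact hnokeyf ⟨g, hg, hgp⟩
            have hff : [f].filter (fun g => pvRootOf SL g == f) = [f] := by simp [hrootf]
            rw [hfilq, hff]
            simp
          · rw [if_neg hk]
            have hff : [f].filter (fun g => pvRootOf SL g == k) = [] := by
              simp [hrootf, Ne.symm hk]
            rw [hff, List.append_nil, hgrp k]
      have := ih (q ++ [f]) (st.1.setdefault f [], st.2.add f) hmem' hkeys' hnd' hgrp' hcl'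
      rw [hassoc] at this
      rw [hstep]
      exact this
    · -- f is appended to its root's group
      have hstep : stepB SL st f = (st.1.modify k0 [] (fun l => l ++ [f]), st.2) := by
        simp only [stepB, ← hk0]; rw [if_neg hcond]
      have hkeys' : ∀ x, x ∈ (st.1.modify k0 [] (fun l => l ++ [f])).keys ↔
          ∃ g ∈ q ++ [f], pvRootOf SL g = x := by
        intro x
        rw [PySem.Dict.keys_modify, PySem.Dict.mem_keys_insert]
        constructor
        · rintro (hxk | h)
          · exact ⟨f, by simp, by rw [← hk0, hxk]⟩
          · obtain ⟨g, hg, hgr⟩ := (hkeys x).mp h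
            exact ⟨g, List.mem_append_left _ hg, hgr⟩
        · rintro ⟨g, hg, hgr⟩
          rcases List.mem_append.mp hg with h | h
          · exact Or.inr ((hkeys x).mpr ⟨g, h, hgr⟩)
          · simp at h; subst h
            exact Or.inl (by rw [← hgr, ← hk0])
      have hnd' : (st.1.modify k0 [] (fun l => l ++ [f])).keys.Nodup := by
        rw [PySem.Dict.keys_modify]
        exact PySem.Dict.nodup_keys_insert _ _ _ hnd
      have hgrp' : ∀ k, (st.1.modify k0 [] (fun l => l ++ [f])).getD k [] =
          (((q ++ [f]).filter (fun g => pvRootOf SL g == k)).erase k) := by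
        intro k
        rw [PySem.Dict.getD_modify, List.filter_append]
        by_cases hk : k = k0
        · rw [if_pos hk, hk, hgrp k0]
          have hff : [f].filter (fun g => pvRootOf SL g == k0) = [f] := by simp [← hk0]
          rw [hff]
          by_cases hkfil : k0 ∈ q.filter (fun g => pvRootOf SL g == k0)
          · rw [List.erase_append_left _ hkfil]
          · rw [List.erase_append_right _ hkfil, List.erase_of_not_mem hkfil]
            have hkf : k0 ≠ f := by
              intro h
              have hfst : f ∈ st.2 := by
                rcases not_and_or.mp hcond with h' | h'
                · exact absurd h h'
                · exact not_not.mp h'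
              obtain ⟨h1, h2⟩ := (hcl f).mp hfst
              exact hkfil (List.mem_filter.mpr ⟨h ▸ h1, by simp [h2, h]⟩)
            have herasef : ([f] : List String).erase k0 = [f] :=
              List.erase_of_not_mem (by simp [hkf])
            rw [herasef]
        · rw [if_neg hk]
          have hff : [f].filter (fun g => pvRootOf SL g == k) = [] := by
            simp [← hk0, Ne.symm hk]
          rw [hff, List.append_nil, hgrp k]
      have hcl' : ∀ x, x ∈ st.2 ↔ x ∈ q ++ [f] ∧ pvRootOf SL x = x := by
        intro x
        constructor
        · intro h
          obtain ⟨h1, h2⟩ := (hcl x).mp h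
          exact ⟨List.mem_append_left _ h1, h2⟩
        · rintro ⟨hx, hr⟩
          rcases List.mem_append.mp hx with h | h
          · exact (hcl x).mpr ⟨h, hr⟩
          · simp at h; subst h
            rcases not_and_or.mp hcond with h' | h'
            · exact absurd (hk0.trans hr) h'
            · exact not_not.mp h'
      have := ih (q ++ [f]) (st.1.modify k0 [] (fun l => l ++ [f]), st.2) hmem' hkeys' hnd' hgrp' hcl'
      rw [hassoc] at this
      rw [hstep]
      exact this

-- the shared output phase of both ports, as a function of the final dict
def outExpr (u : Bool) (m : PySem.Dict String (List String)) : List String :=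
  (PySem.List.sorted m.keys (fun s => s)).foldl
    (fun out domain =>
      let out := out ++ [domain]
      if u then out ++ PySem.List.sorted (PySem.Set.ofList (m.getD domain [])) (fun s => s)
      else out ++ PySem.List.sorted (m.getD domain []) (fun s => s))
    []

theorem outExpr_congr (u : Bool) (m m' : PySem.Dict String (List String))
    (hks : PySem.List.sorted m.keys (fun s => s) = PySem.List.sorted m'.keys (fun s => s))
    (hg : ∀ k, (m.getD k []).Perm (m'.getD k [])) : outExpr u m = outExpr u m' := by
  unfold outExpr
  rw [hks]
  apply PySem.List.foldl_congr_mem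
  intro acc k _
  have h1 : PySem.List.sorted (PySem.Set.ofList (m.getD k [])) (fun s => s) =
      PySem.List.sorted (PySem.Set.ofList (m'.getD k [])) (fun s => s) := by
    apply PySem.List.sorted_eq_sorted_of_perm _ _ _ (fun a b h => h)
    rw [List.perm_ext_iff_of_nodup (PySem.Set.nodup_ofList _) (PySem.Set.nodup_ofList _)]
    intro x
    rw [PySem.Set.mem_ofList, PySem.Set.mem_ofList]
    exact (hg k).mem_iff
  have h2 : PySem.List.sorted (m.getD k []) (fun s => s) =
      PySem.List.sorted (m'.getD k []) (fun s => s) :=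
    PySem.List.sorted_eq_sorted_of_perm _ _ _ (fun a b h => h) (hg k)
  show (if u then (acc ++ [k]) ++ PySem.List.sorted (PySem.Set.ofList (m.getD k [])) (fun s => s)
        else (acc ++ [k]) ++ PySem.List.sorted (m.getD k []) (fun s => s)) =
       (if u then (acc ++ [k]) ++ PySem.List.sorted (PySem.Set.ofList (m'.getD k [])) (fun s => s)
        else (acc ++ [k]) ++ PySem.List.sorted (m'.getD k []) (fun s => s))
  rw [h1, h2]

theorem lower_length (s : String) : (PySem.Str.lower s).length = s.length := by
  rw [← String.length_toList, ← String.length_toList, PySem.Str.toList_lower]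
  simp [PySem.Chars.lower]

-- ===== VERDICT (by name: the statement is the Claim_ definition above) =====
theorem sort_fqdns_spec : Claim_equal_sort_fqdns := by
  intro fqdns unique lowercase _
  show sort_fqdns fqdns unique lowercase = sort_fqdns_alt fqdns unique lowercase
  set lw : String → String := fun s => if lowercase then PySem.Str.lower s else s with hlw
  set L : List String := if lowercase then fqdns.map PySem.Str.lower else fqdns with hL
  have hLlw : L = fqdns.map lw := by
    by_cases h : lowercase = true <;> simp [hL, hlw, h]
  set SL : PySem.Set String := PySem.Set.ofList L with hSL
  set P : List String := (PySem.List.sorted fqdns (fun s => s.length)).map lw with hP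
  have hperm : P.Perm L := by
    rw [hP, hLlw]
    exact (PySem.List.sorted_perm fqdns (fun s => s.length) false).map lw
  have hlen : ∀ s, (lw s).length = s.length := by
    intro s
    rw [hlw]
    by_cases h : lowercase = true
    · simp only [if_pos h]; exact lower_length s
    · simp only [if_neg h]
  have hpair : P.Pairwise (fun a b => a.length ≤ b.length) := by
    rw [hP, List.pairwise_map]
    have h := PySem.List.sorted_pairwise fqdns (fun s => s.length)
    exact h.imp (by intro a b hab; rw [hlen, hlen]; exact hab)
  have hmemP : ∀ x, x ∈ ([] : List String) ++ P ↔ x ∈ SL := by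
    intro x
    rw [List.nil_append, hperm.mem_iff, hSL, PySem.Set.mem_ofList]
  obtain ⟨hKA, hndA, hGA⟩ := A_fold_inv SL P [] PySem.Dict.empty
    (by simpa using hpair) hmemP
    (by intro x; simp [PySem.Dict.keys_empty])
    (by simp [PySem.Dict.keys_empty])
    (by intro k; simp [PySem.Dict.getD_empty])
  obtain ⟨hKB, hndB, hGB⟩ := B_fold_inv SL L [] (PySem.Dict.empty, PySem.Set.empty)
    (by intro x hx; rw [hSL, PySem.Set.mem_ofList]; simpa using hx)
    (by intro x; simp [PySem.Dict.keys_empty])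
    (by simp [PySem.Dict.keys_empty])
    (by intro k; simp [PySem.Dict.getD_empty])
    (by intro x; simp [PySem.Set.empty])
  simp only [List.nil_append] at hKA hKB hGA hGB
  have hkmem : ∀ x, x ∈ (P.foldl stepA PySem.Dict.empty).keys ↔
      x ∈ (L.foldl (stepB SL) (PySem.Dict.empty, PySem.Set.empty)).1.keys := by
    intro x
    rw [hKA x, hKB x]
    constructor
    · rintro ⟨hx, hmin⟩
      exact ⟨x, hperm.mem_iff.mp hx,
        pvRootOf_eq_self SL x ((hSL ▸ PySem.Set.mem_ofList L x).mpr (hperm.mem_iff.mp hx)) hmin⟩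
    · rintro ⟨g, hg, hgr⟩
      have hgSL : g ∈ SL := by rw [hSL, PySem.Set.mem_ofList]; exact hg
      have hspec := SuffMin_pvRootOf SL g hgSL
      rw [hgr] at hspec
      refine ⟨?_, hspec⟩
      have hxL : x ∈ L := by
        have := hspec.1
        rwa [hSL, PySem.Set.mem_ofList] at this
      exact hperm.mem_iff.mpr hxL
  have hpermK : (P.foldl stepA PySem.Dict.empty).keys.Perm
      (L.foldl (stepB SL) (PySem.Dict.empty, PySem.Set.empty)).1.keys :=
    (List.perm_ext_iff_of_nodup hndA hndB).mpr hkmem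
  have hgperm : ∀ k, ((P.foldl stepA PySem.Dict.empty).getD k []).Perm
      ((L.foldl (stepB SL) (PySem.Dict.empty, PySem.Set.empty)).1.getD k []) := by
    intro k
    rw [hGA k, hGB k]
    exact List.Perm.erase k (hperm.filter _)
  have hsortK := PySem.List.sorted_eq_sorted_of_perm _ _ (fun s : String => s)
    (fun a b h => h) hpermK
  have hA : sort_fqdns fqdns unique lowercase = outExpr unique (P.foldl stepA PySem.Dict.empty) := by
    have h0 : sort_fqdns fqdns unique lowercase =
        outExpr unique ((PySem.List.sorted fqdns (fun s => s.length)).foldl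
          (fun d x => stepA d (lw x)) PySem.Dict.empty) := rfl
    rw [h0]
    refine congrArg (outExpr unique) ?_
    rw [hP]
    exact List.foldl_map.symm
  have hB : sort_fqdns_alt fqdns unique lowercase =
      outExpr unique (L.foldl (stepB SL) (PySem.Dict.empty, PySem.Set.empty)).1 := rfl
  rw [hA, hB]
  exact outExpr_congr unique _ _ hsortK hgperm
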